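-- pv_equiv track=rewrite | github.com/azebell/advent-of-code | python/2023/day01.py | part2
-- ===== SOURCE A (Python) =====
-- def part2(input_str: str) -> str:
--     numbers = [
--         "one", "1",
--         "two", "2",
--         "three", "3",
--         "four", "4",
--         "five", "5",
--         "six", "6",
--         "seven", "7",
--         "eight", "8",
--         "nine", "9"
--     ]
--
--     total = 0
--     lines = input_str.strip().split("\n")
--     for line in lines:
--         first = min((line.index(s), s) for s in numbers if s in line)[1]
--         last = max((line.rindex(s), s) for s in numbers if s in line)[1]
--
--         i = numbers.index(first)
--         j = numbers.index(last)
--         if i % 2 == 0: first = numbers[i+1]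
--         if j % 2 == 0: last = numbers[j+1]
--
--         total += int(f"{first}{last}")
--
--     return str(total)
-- ===== SOURCE B (Python) =====
-- def part2(input_str: str) -> str:
--     tokens = {
--         "one": "1", "1": "1",
--         "two": "2", "2": "2",
--         "three": "3", "3": "3",
--         "four": "4", "4": "4",
--         "five": "5", "5": "5",
--         "six": "6", "6": "6",
--         "seven": "7", "7": "7",
--         "eight": "8", "8": "8",
--         "nine": "9", "9": "9",
--     }
--
--     def match_at(line, i):
--         for tok, digit in tokens.items():
--             if line.startswith(tok, i):
--                 return digit
--         return None
--
--     def first_digit(line):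
--         for i in range(len(line)):
--             d = match_at(line, i)
--             if d is not None:
--                 return d
--         raise ValueError("no digit in line")
--
--     def last_digit(line):
--         for i in range(len(line) - 1, -1, -1):
--             d = match_at(line, i)
--             if d is not None:
--                 return d
--         raise ValueError("no digit in line")
--
--     lines = input_str.strip().split("\n")
--     return str(sum(int(first_digit(line) + last_digit(line)) for line in lines))
-- ===== Notes on version B (the rewrite author's own statement) =====
-- stated objective: idiomatic
-- what changed: Replaces A's per-token index/rindex passes combined through tuple min/max and the list-index parity trick with a single positional scan (leftmost and rightmost position where any token starts, via startswith) and a direct token-to-digit mapping.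
-- outside the precondition, e.g. on part2('\n'): A raises ValueError, B raises ValueError
import Mathlib
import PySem

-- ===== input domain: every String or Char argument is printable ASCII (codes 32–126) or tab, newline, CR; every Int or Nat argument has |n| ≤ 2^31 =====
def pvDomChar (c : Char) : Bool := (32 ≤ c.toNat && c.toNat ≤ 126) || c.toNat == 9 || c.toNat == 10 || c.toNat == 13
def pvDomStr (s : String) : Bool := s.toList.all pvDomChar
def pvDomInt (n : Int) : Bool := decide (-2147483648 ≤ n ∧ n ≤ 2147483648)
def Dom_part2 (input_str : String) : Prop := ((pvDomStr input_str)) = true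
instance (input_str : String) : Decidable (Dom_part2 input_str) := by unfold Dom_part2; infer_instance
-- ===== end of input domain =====

-- B re-implements part2 by a positional startswith scan with a token→digit table instead of
-- A's per-token index/rindex passes combined through tuple min/max (objective: idiomatic; not faster).

-- ===== PORT A =====
def aNumbers : List (List Char) :=
  [['o','n','e'], ['1'], ['t','w','o'], ['2'], ['t','h','r','e','e'], ['3'],
   ['f','o','u','r'], ['4'], ['f','i','v','e'], ['5'], ['s','i','x'], ['6'],
   ['s','e','v','e','n'], ['7'], ['e','i','g','h','t'], ['8'], ['n','i','n','e'], ['9']]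

-- Python tuple comparison (int, str) < (int, str); str '<' is PySem.Chars.strLt (exact).
def pyLexLt (p q : Int × List Char) : Bool :=
  decide (p.1 < q.1) || (p.1 == q.1 && PySem.Chars.strLt p.2 q.2)

-- hand port of Python min(...) / max(...) over the nonempty generator of pairs (exact:
-- min keeps the first element unless a strictly smaller one appears, max dually)
def pyMinPairs : List (Int × List Char) → Option (Int × List Char)
  | [] => none
  | p :: ps => some (ps.foldl (fun a x => if pyLexLt x a then x else a) p)

def pyMaxPairs : List (Int × List Char) → Option (Int × List Char)
  | [] => none
  | p :: ps => some (ps.foldl (fun a x => if pyLexLt a x then x else a) p)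

def aCand (line : List Char) : List (List Char) :=
  aNumbers.filter (fun s => PySem.Chars.isIn s line)

def pairsF (line : List Char) : List (Int × List Char) :=
  (aCand line).map (fun s => (PySem.Chars.find line s, s))

def pairsR (line : List Char) : List (Int × List Char) :=
  (aCand line).map (fun s => (PySem.Chars.rfind line s, s))

-- numbers.index(s); if i % 2 == 0: s = numbers[i+1]   (none = Python raising)
def aMap (s : List Char) : Option (List Char) :=
  match PySem.List.index? aNumbers s with
  | some i => if i % 2 == 0 then PySem.List.pyGet? aNumbers ((i : Int) + 1) else some s
  | none => none

def aLine (line : List Char) : Option Int :=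
  match pyMinPairs (pairsF line), pyMaxPairs (pairsR line) with
  | some fp, some lp =>
    match aMap fp.2, aMap lp.2 with
    | some first, some last => PySem.Int.ofChars? (first ++ last)
    | _, _ => none
  | _, _ => none

def aLoop : List (List Char) → Int → Option Int
  | [], total => some total
  | l :: ls, total =>
    match aLine l with
    | some v => aLoop ls (total + v)
    | none => none

def part2 (input_str : String) : String :=
  match aLoop (PySem.Chars.splitOn (PySem.Chars.strip input_str.toList) ['\n']) 0 with
  | some t => PySem.Int.toStr t
  | none => ""   -- unreachable under Pre_part2 (Python raises ValueError there)

-- ===== PORT B =====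
def bTokens : List (List Char × Char) :=
  [(['o','n','e'], '1'), (['1'], '1'), (['t','w','o'], '2'), (['2'], '2'),
   (['t','h','r','e','e'], '3'), (['3'], '3'), (['f','o','u','r'], '4'), (['4'], '4'),
   (['f','i','v','e'], '5'), (['5'], '5'), (['s','i','x'], '6'), (['6'], '6'),
   (['s','e','v','e','n'], '7'), (['7'], '7'), (['e','i','g','h','t'], '8'), (['8'], '8'),
   (['n','i','n','e'], '9'), (['9'], '9')]

-- match_at(line, i): the scanned position i is the head of the suffix `line.drop i`
def bMatchAt (suffix : List Char) : Option Char :=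
  (bTokens.find? (fun p => PySem.Chars.startswith suffix p.1)).map (·.2)

-- for i in range(len(line)): leftmost position first
def bFirst : List Char → Option Char
  | [] => none
  | c :: cs =>
    match bMatchAt (c :: cs) with
    | some d => some d
    | none => bFirst cs

-- for i in range(len(line)-1, -1, -1): rightmost position first (positions 1.. before position 0)
def bLast : List Char → Option Char
  | [] => none
  | c :: cs =>
    match bLast cs with
    | some d => some d
    | none => bMatchAt (c :: cs)

def bLine (line : List Char) : Option Int :=
  match bFirst line, bLast line with
  | some d1, some d2 => PySem.Int.ofChars? [d1, d2]
  | _, _ => none   -- Python raises ValueError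

def bVals : List (List Char) → Option (List Int)
  | [] => some []
  | l :: ls =>
    match bLine l, bVals ls with
    | some v, some vs => some (v :: vs)
    | _, _ => none

def part2_alt (input_str : String) : String :=
  match bVals (PySem.Chars.splitOn (PySem.Chars.strip input_str.toList) ['\n']) with
  | some vs => PySem.Int.toStr vs.sum
  | none => ""   -- unreachable under Pre_part2

-- ===== PRECONDITION & SPEC =====
-- Pre_ excludes exactly the inputs on which Python A raises ValueError (min()/max() of an
-- empty generator): some line of the stripped, '\n'-split input contains none of the 18 tokens.
def Pre_part2 (input_str : String) : Prop :=
  ∀ l ∈ PySem.Chars.splitOn (PySem.Chars.strip input_str.toList) ['\n'],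
    ∃ s ∈ aNumbers, PySem.Chars.isIn s l = true
instance (input_str : String) : Decidable (Pre_part2 input_str) := by unfold Pre_part2; infer_instance

def pvWitness_part2 : String := "two1nine\nfourcc9"

def Spec_part2 (input_str : String) (out : String) : Prop := out = part2_alt input_str
instance (input_str : String) (out : String) : Decidable (Spec_part2 input_str out) := by unfold Spec_part2; infer_instance

-- ===== CLAIM (what is proved, stated in full; the proofs are below) =====
def Claim_equal_part2 : Prop := ∀ (input_str : String), Dom_part2 input_str → Pre_part2 input_str → Spec_part2 input_str (part2 input_str)

-- ===== LEMMAS AND PROOFS =====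

theorem numbers_eq : aNumbers = bTokens.map (·.1) := by decide


theorem find_go_shift (sub : List Char) : ∀ (l : List Char) (k : Nat),
    PySem.Chars.find.go sub l k =
      if PySem.Chars.find.go sub l 0 = -1 then -1 else PySem.Chars.find.go sub l 0 + k := by
  intro l
  induction l with
  | nil => intro k; by_cases h : sub.isEmpty <;> simp [PySem.Chars.find.go, h]
  | cons c cs ih =>
    intro k
    by_cases h : sub.isPrefixOf (c :: cs)
    · simp [PySem.Chars.find.go, h]
    · have hge : -1 ≤ PySem.Chars.find.go sub cs 0 := by
        have := PySem.Chars.neg_one_le_find cs sub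
        simpa [PySem.Chars.find] using this
      simp only [PySem.Chars.find.go, h]
      rw [ih (k+1), ih 1]
      by_cases h0 : PySem.Chars.find.go sub cs 0 = -1
      · simp [h0]
      · have : ¬ (PySem.Chars.find.go sub cs 0 + 1 = -1) := by omega
        simp [h0, this]; omega

theorem find_cons (c : Char) (cs sub : List Char) :
    PySem.Chars.find (c :: cs) sub =
      if sub.isPrefixOf (c :: cs) then 0
      else if PySem.Chars.find cs sub = -1 then -1 else PySem.Chars.find cs sub + 1 := by
  by_cases h : sub.isPrefixOf (c :: cs)
  · simp [PySem.Chars.find, PySem.Chars.find.go, h]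
  · simp only [PySem.Chars.find, PySem.Chars.find.go, h]
    rw [find_go_shift]
    by_cases h0 : PySem.Chars.find.go sub cs 0 = -1 <;> simp [h0]

theorem isIn_cons (sub : List Char) (c : Char) (cs : List Char) :
    PySem.Chars.isIn sub (c :: cs) = (sub.isPrefixOf (c :: cs) || PySem.Chars.isIn sub cs) := by
  have hge : -1 ≤ PySem.Chars.find cs sub := PySem.Chars.neg_one_le_find cs sub
  simp only [PySem.Chars.isIn, find_cons]
  by_cases h : sub.isPrefixOf (c :: cs)
  · simp [h]
  · by_cases h0 : PySem.Chars.find cs sub = -1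
    · simp [h, h0]
    · have : ¬ (PySem.Chars.find cs sub + 1 = -1) := by omega
      simp only [if_neg h, if_neg h0]
      rw [show (PySem.Chars.find cs sub + 1 != -1) = true by simp [this],
          show (PySem.Chars.find cs sub != -1) = true by simp [h0]]
      simp


theorem rgo_zero (s sub : List Char) :
    PySem.Chars.rfind.go s sub 0 = if sub.isPrefixOf s then 0 else -1 := by
  simp [PySem.Chars.rfind.go]

theorem rgo_succ (s sub : List Char) (j : Nat) :
    PySem.Chars.rfind.go s sub (j+1) =
      if sub.isPrefixOf (s.drop (j+1)) then ((j:Int)+1) else PySem.Chars.rfind.go s sub j := by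
  simp [PySem.Chars.rfind.go]

theorem rgo_shift (c : Char) (cs sub : List Char) : ∀ (j : Nat), j ≤ cs.length →
    PySem.Chars.rfind.go (c :: cs) sub (j+1) =
      if PySem.Chars.rfind.go cs sub j = -1
      then (if sub.isPrefixOf (c :: cs) then 0 else -1)
      else PySem.Chars.rfind.go cs sub j + 1 := by
  intro j
  induction j with
  | zero =>
    intro _
    rw [rgo_succ, rgo_zero, rgo_zero]
    by_cases hp : sub.isPrefixOf cs
    · simp [hp]
    · simp [hp]
  | succ j ih =>
    intro hj
    have hd : (c :: cs).drop (j+1+1) = cs.drop (j+1) := by simp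
    rw [rgo_succ (c :: cs) sub (j+1), rgo_succ cs sub j, hd]
    by_cases hp : sub.isPrefixOf (cs.drop (j+1))
    · have h1 : ¬ ((j:Int)+1 = -1) := by omega
      rw [if_pos hp, if_pos hp, if_neg h1]
      push_cast; ring
    · rw [if_neg hp, if_neg hp, ih (by omega)]

theorem rfind_cons (c : Char) (cs sub : List Char) :
    PySem.Chars.rfind (c :: cs) sub =
      if PySem.Chars.rfind cs sub = -1
      then (if sub.isPrefixOf (c :: cs) then 0 else -1)
      else PySem.Chars.rfind cs sub + 1 := by
  show PySem.Chars.rfind.go (c :: cs) sub (c :: cs).length = _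
  rw [List.length_cons, rgo_shift c cs sub cs.length (le_refl _)]
  rfl

theorem neg_one_le_rfind (sub : List Char) : ∀ (l : List Char), -1 ≤ PySem.Chars.rfind l sub := by
  intro l
  induction l with
  | nil =>
    show -1 ≤ PySem.Chars.rfind.go [] sub 0
    rw [rgo_zero]
    by_cases h : sub.isPrefixOf [] <;> simp [h]
  | cons c cs ih =>
    rw [rfind_cons]
    by_cases h0 : PySem.Chars.rfind cs sub = -1
    · by_cases hp : sub.isPrefixOf (c :: cs) <;> simp [h0, hp]
    · rw [if_neg h0]; omega

theorem rfind_eq_neg_one_iff' (sub : List Char) : ∀ (l : List Char),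
    (PySem.Chars.rfind l sub = -1 ↔ PySem.Chars.isIn sub l = false) := by
  intro l
  induction l with
  | nil =>
    show PySem.Chars.rfind.go [] sub 0 = -1 ↔ _
    rw [rgo_zero]
    by_cases h : sub.isPrefixOf [] <;>
      simp_all [PySem.Chars.isIn, PySem.Chars.find, PySem.Chars.find.go, List.isPrefixOf_iff_prefix, List.isEmpty_iff]
  | cons c cs ih =>
    rw [rfind_cons, isIn_cons]
    by_cases h0 : PySem.Chars.rfind cs sub = -1
    · have hin : PySem.Chars.isIn sub cs = false := ih.1 h0
      by_cases hp : sub.isPrefixOf (c :: cs) <;> simp [h0, hp, hin]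
    · have hge := neg_one_le_rfind sub cs
      have hin : PySem.Chars.isIn sub cs = true := by
        rcases Bool.eq_false_or_eq_true (PySem.Chars.isIn sub cs) with h | h
        · exact h
        · exact absurd (ih.2 h) h0
      rw [if_neg h0]
      constructor
      · intro h; omega
      · intro h; simp [hin] at h

theorem pyLexLt_of_lt {p q : Int × List Char} (h : p.1 < q.1) : pyLexLt p q = true := by
  simp [pyLexLt, h]

theorem pyLexLt_false_of_lt {p q : Int × List Char} (h : p.1 < q.1) : pyLexLt q p = false := by
  have h1 : ¬ (q.1 < p.1) := by omega
  have h2 : ¬ (q.1 = p.1) := by omega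
  simp [pyLexLt, h1, h2]

theorem pyLexLt_irrefl (p : Int × List Char) : pyLexLt p p = false := by
  simp [pyLexLt, PySem.Chars.strLt]

theorem minFold_aux (p : Int × List Char) : ∀ (xs : List (Int × List Char)) (a : Int × List Char),
    (a = p ∨ p.1 < a.1) → (p ∈ xs ∨ a = p) → (∀ q ∈ xs, q = p ∨ p.1 < q.1) →
    xs.foldl (fun a x => if pyLexLt x a then x else a) a = p := by
  intro xs
  induction xs with
  | nil =>
    intro a _ hmem _
    rcases hmem with h | h
    · simp at h
    · simpa using h
  | cons x xs ih =>
    intro a ha hmem hall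
    have hx := hall x (List.mem_cons_self)
    simp only [List.foldl_cons]
    apply ih
    · -- invariant on the new accumulator
      rcases hx with rfl | hx
      · rcases ha with rfl | ha
        · rw [pyLexLt_irrefl]; simp
        · rw [pyLexLt_of_lt ha]; simp
      · rcases ha with rfl | ha
        · rw [pyLexLt_false_of_lt hx]; simp
        · by_cases ht : pyLexLt x a = true
          · rw [ht]; simp; right; exact hx
          · rw [Bool.not_eq_true] at ht; rw [ht]; simp; right; exact ha
    · -- p still reachable
      rcases ha with rfl | ha
      · rcases hx with rfl | hx
        · right; rw [pyLexLt_irrefl]; simp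
        · right; rw [pyLexLt_false_of_lt hx]; simp
      · rcases hx with rfl | hx
        · right; rw [pyLexLt_of_lt ha]; simp
        · rcases hmem with hm | rfl
          · rcases List.mem_cons.1 hm with rfl | hm
            · exact (lt_irrefl _ hx).elim
            · left; exact hm
          · omega
    · intro q hq; exact hall q (List.mem_cons_of_mem _ hq)

theorem pyMinPairs_unique {xs : List (Int × List Char)} {p : Int × List Char}
    (hmem : p ∈ xs) (hlt : ∀ q ∈ xs, q ≠ p → p.1 < q.1) : pyMinPairs xs = some p := by
  cases xs with
  | nil => simp at hmem
  | cons x xs =>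
    have hall : ∀ q ∈ x :: xs, q = p ∨ p.1 < q.1 := by
      intro q hq
      by_cases h : q = p
      · left; exact h
      · right; exact hlt q hq h
    have hx := hall x (List.mem_cons_self)
    simp only [pyMinPairs]
    congr 1
    apply minFold_aux
    · exact hx
    · rcases List.mem_cons.1 hmem with rfl | hm
      · right; rfl
      · left; exact hm
    · intro q hq; exact hall q (List.mem_cons_of_mem _ hq)

theorem maxFold_aux (p : Int × List Char) : ∀ (xs : List (Int × List Char)) (a : Int × List Char),
    (a = p ∨ a.1 < p.1) → (p ∈ xs ∨ a = p) → (∀ q ∈ xs, q = p ∨ q.1 < p.1) →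
    xs.foldl (fun a x => if pyLexLt a x then x else a) a = p := by
  intro xs
  induction xs with
  | nil =>
    intro a _ hmem _
    rcases hmem with h | h
    · simp at h
    · simpa using h
  | cons x xs ih =>
    intro a ha hmem hall
    have hx := hall x (List.mem_cons_self)
    simp only [List.foldl_cons]
    apply ih
    · rcases hx with rfl | hx
      · rcases ha with rfl | ha
        · rw [pyLexLt_irrefl]; simp
        · rw [pyLexLt_of_lt ha]; simp
      · rcases ha with rfl | ha
        · rw [pyLexLt_false_of_lt hx]; simp
        · by_cases ht : pyLexLt a x = true
          · rw [ht]; simp; right; exact hx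
          · rw [Bool.not_eq_true] at ht; rw [ht]; simp; right; exact ha
    · rcases ha with rfl | ha
      · rcases hx with rfl | hx
        · right; rw [pyLexLt_irrefl]; simp
        · right; rw [pyLexLt_false_of_lt hx]; simp
      · rcases hx with rfl | hx
        · right; rw [pyLexLt_of_lt ha]; simp
        · rcases hmem with hm | rfl
          · rcases List.mem_cons.1 hm with rfl | hm
            · omega
            · left; exact hm
          · omega
    · intro q hq; exact hall q (List.mem_cons_of_mem _ hq)

theorem pyMaxPairs_unique {xs : List (Int × List Char)} {p : Int × List Char}
    (hmem : p ∈ xs) (hlt : ∀ q ∈ xs, q ≠ p → q.1 < p.1) : pyMaxPairs xs = some p := by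
  cases xs with
  | nil => simp at hmem
  | cons x xs =>
    have hall : ∀ q ∈ x :: xs, q = p ∨ q.1 < p.1 := by
      intro q hq
      by_cases h : q = p
      · left; exact h
      · right; exact hlt q hq h
    have hx := hall x (List.mem_cons_self)
    simp only [pyMaxPairs]
    congr 1
    apply maxFold_aux
    · exact hx
    · rcases List.mem_cons.1 hmem with rfl | hm
      · right; rfl
      · left; exact hm
    · intro q hq; exact hall q (List.mem_cons_of_mem _ hq)



theorem tok_nonprefix : ∀ p ∈ bTokens, ∀ q ∈ bTokens, p.1 <+: q.1 → p = q := by decide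

theorem tok_uniq {l : List Char} {p q : List Char × Char} (hp : p ∈ bTokens) (hq : q ∈ bTokens)
    (h1 : p.1 <+: l) (h2 : q.1 <+: l) : p = q := by
  rcases List.prefix_or_prefix_of_prefix h1 h2 with h | h
  · exact tok_nonprefix p hp q hq h
  · exact (tok_nonprefix q hq p hp h).symm

theorem mem_numbers {p : List Char × Char} (hp : p ∈ bTokens) : p.1 ∈ aNumbers := by
  rw [numbers_eq]; exact List.mem_map_of_mem hp

theorem exists_tok {s : List Char} (hs : s ∈ aNumbers) : ∃ p ∈ bTokens, p.1 = s := by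
  rw [numbers_eq] at hs
  rcases List.mem_map.1 hs with ⟨p, hp, he⟩
  exact ⟨p, hp, he⟩

theorem mem_cand_iff {s l : List Char} :
    s ∈ aCand l ↔ s ∈ aNumbers ∧ PySem.Chars.isIn s l = true := by
  simp [aCand, List.mem_filter]

theorem find_nonneg_of_isIn {s l : List Char} (h : PySem.Chars.isIn s l = true) :
    0 ≤ PySem.Chars.find l s := by
  rw [PySem.Chars.find_nonneg_iff]
  exact (PySem.Chars.isIn_iff_infix s l).1 h

theorem isIn_of_find_nonneg {s l : List Char} (h : 0 ≤ PySem.Chars.find l s) :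
    PySem.Chars.isIn s l = true := by
  rw [PySem.Chars.isIn_iff_infix]
  exact (PySem.Chars.find_nonneg_iff l s).1 h

def FirstInv (l : List Char) : Prop :=
  (pyMinPairs (pairsF l) = none ∧ bFirst l = none ∧ aCand l = [])
  ∨ ∃ p ∈ bTokens, ∃ i : Int, 0 ≤ i ∧ PySem.Chars.find l p.1 = i ∧
      pyMinPairs (pairsF l) = some (i, p.1) ∧ bFirst l = some p.2 ∧
      ∀ q ∈ pairsF l, q ≠ (i, p.1) → i < q.1

def LastInv (l : List Char) : Prop :=
  (pyMaxPairs (pairsR l) = none ∧ bLast l = none ∧ aCand l = [])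
  ∨ ∃ p ∈ bTokens, ∃ i : Int, 0 ≤ i ∧ PySem.Chars.rfind l p.1 = i ∧
      pyMaxPairs (pairsR l) = some (i, p.1) ∧ bLast l = some p.2 ∧
      ∀ q ∈ pairsR l, q ≠ (i, p.1) → q.1 < i

theorem firstInv : ∀ l : List Char, FirstInv l := by
  intro l
  induction l with
  | nil =>
    left
    have hc : aCand ([] : List Char) = [] := by decide
    exact ⟨by simp [pairsF, hc, pyMinPairs], rfl, hc⟩
  | cons c cs ih =>
    cases hf : bTokens.find? (fun p => PySem.Chars.startswith (c :: cs) p.1) with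
    | some p =>
      have hpmem := List.mem_of_find?_eq_some hf
      have hppre : p.1 <+: (c :: cs) := by
        have := List.find?_some hf
        rwa [PySem.Chars.startswith_iff] at this
      have hfind0 : PySem.Chars.find (c :: cs) p.1 = 0 := by
        rw [find_cons, if_pos (List.isPrefixOf_iff_prefix.2 hppre)]
      have hisin : PySem.Chars.isIn p.1 (c :: cs) = true := by
        rw [isIn_cons, List.isPrefixOf_iff_prefix.2 hppre]; simp
      have hcand : p.1 ∈ aCand (c :: cs) := mem_cand_iff.2 ⟨mem_numbers hpmem, hisin⟩
      have hpair : ((0 : Int), p.1) ∈ pairsF (c :: cs) := by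
        simp only [pairsF]
        exact List.mem_map.2 ⟨p.1, hcand, by rw [hfind0]⟩
      have hothers : ∀ q ∈ pairsF (c :: cs), q ≠ ((0 : Int), p.1) → (0:Int) < q.1 := by
        intro q hq hne
        simp only [pairsF] at hq
        rcases List.mem_map.1 hq with ⟨s, hs, rfl⟩
        rcases mem_cand_iff.1 hs with ⟨hsN, hsIn⟩
        by_cases hsp : s = p.1
        · subst hsp; rw [hfind0] at hne; exact absurd rfl hne
        · rcases exists_tok hsN with ⟨ps, hpsmem, rfl⟩
          have hnpre : ¬ ps.1 <+: (c :: cs) := by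
            intro hpre
            exact hsp (congrArg Prod.fst (tok_uniq hpsmem hpmem hpre hppre))
          have hiscs : PySem.Chars.isIn ps.1 cs = true := by
            rw [isIn_cons] at hsIn
            rcases Bool.or_eq_true_iff.1 hsIn with h | h
            · exact absurd (List.isPrefixOf_iff_prefix.1 h) hnpre
            · exact h
          have hge : 0 ≤ PySem.Chars.find cs ps.1 := find_nonneg_of_isIn hiscs
          have hfs : PySem.Chars.find (c :: cs) ps.1 = PySem.Chars.find cs ps.1 + 1 := by
            rw [find_cons, if_neg (fun h => hnpre (List.isPrefixOf_iff_prefix.1 h)),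
                if_neg (by omega)]
          simp only [hfs]; omega
      right
      refine ⟨p, hpmem, 0, le_refl 0, hfind0, pyMinPairs_unique hpair ?_, ?_, hothers⟩
      · intro q hq hne; exact hothers q hq hne
      · simp [bFirst, bMatchAt, hf]
    | none =>
      have hnp : ∀ p ∈ bTokens, ¬ p.1 <+: (c :: cs) := by
        intro p hp hpre
        have hx := List.find?_eq_none.1 hf p hp
        exact hx (by rw [PySem.Chars.startswith_iff]; exact hpre)
      have hnpS : ∀ s ∈ aNumbers, ¬ s <+: (c :: cs) := by
        intro s hs
        rcases exists_tok hs with ⟨p, hp, rfl⟩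
        exact hnp p hp
      have hisin_eq : ∀ s ∈ aNumbers, PySem.Chars.isIn s (c :: cs) = PySem.Chars.isIn s cs := by
        intro s hs
        rw [isIn_cons]
        have : s.isPrefixOf (c :: cs) = false := by
          rcases Bool.eq_false_or_eq_true (s.isPrefixOf (c :: cs)) with h | h
          · exact absurd (List.isPrefixOf_iff_prefix.1 h) (hnpS s hs)
          · exact h
        rw [this, Bool.false_or]
      have hcand_eq : aCand (c :: cs) = aCand cs :=
        List.filter_congr (fun s hs => hisin_eq s hs)
      have hbf : bFirst (c :: cs) = bFirst cs := by simp [bFirst, bMatchAt, hf]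
      rcases ih with ⟨hmin0, hbfn, hcand0⟩ | ⟨p, hpmem, i, hi0, hfind, hmin, hbfs, hinv⟩
      · left
        have hc : aCand (c :: cs) = [] := by rw [hcand_eq, hcand0]
        exact ⟨by simp [pairsF, hc, pyMinPairs], by rw [hbf, hbfn], hc⟩
      · right
        have hiscs : PySem.Chars.isIn p.1 cs = true :=
          isIn_of_find_nonneg (by rw [hfind]; exact hi0)
        have hfind' : PySem.Chars.find (c :: cs) p.1 = i + 1 := by
          rw [find_cons, if_neg (fun h => hnp p hpmem (List.isPrefixOf_iff_prefix.1 h)),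
              hfind, if_neg (by omega)]
        have hmemc : p.1 ∈ aCand (c :: cs) := by
          rw [hcand_eq]
          exact mem_cand_iff.2 ⟨mem_numbers hpmem, hiscs⟩
        have hpair : ((i + 1 : Int), p.1) ∈ pairsF (c :: cs) := by
          simp only [pairsF]
          exact List.mem_map.2 ⟨p.1, hmemc, by rw [hfind']⟩
        have hothers : ∀ q ∈ pairsF (c :: cs), q ≠ ((i + 1 : Int), p.1) → (i + 1 : Int) < q.1 := by
          intro q hq hne
          simp only [pairsF] at hq
          rcases List.mem_map.1 hq with ⟨s, hs, rfl⟩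
          have hs' : s ∈ aCand cs := by rwa [hcand_eq] at hs
          rcases mem_cand_iff.1 hs' with ⟨hsN, hsIn⟩
          have hge : 0 ≤ PySem.Chars.find cs s := find_nonneg_of_isIn hsIn
          have hfs : PySem.Chars.find (c :: cs) s = PySem.Chars.find cs s + 1 := by
            rw [find_cons, if_neg (fun h => hnpS s hsN (List.isPrefixOf_iff_prefix.1 h)),
                if_neg (by omega)]
          have hmem2 : (PySem.Chars.find cs s, s) ∈ pairsF cs := by
            simp only [pairsF]
            exact List.mem_map.2 ⟨s, hs', rfl⟩
          by_cases he : ((PySem.Chars.find cs s : Int), s) = (i, p.1)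
          · exfalso
            apply hne
            have h1 : s = p.1 := congrArg Prod.snd he
            have h2 : PySem.Chars.find cs s = i := congrArg Prod.fst he
            rw [hfs, h2, h1]
          · have := hinv _ hmem2 he
            simp only [hfs]
            simp only at this
            omega
        exact ⟨p, hpmem, i + 1, by omega, hfind',
          pyMinPairs_unique hpair (fun q hq hne => hothers q hq hne),
          by rw [hbf]; exact hbfs, hothers⟩

theorem lastInv : ∀ l : List Char, LastInv l := by
  intro l
  induction l with
  | nil =>
    left
    have hc : aCand ([] : List Char) = [] := by decide
    exact ⟨by simp [pairsR, hc, pyMaxPairs], rfl, hc⟩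
  | cons c cs ih =>
    rcases ih with ⟨hmax0, hbln, hcand0⟩ | ⟨p, hpmem, i, hi0, hrfind, hmax, hbls, hinv⟩
    · have hnin : ∀ s ∈ aNumbers, PySem.Chars.isIn s cs = false := by
        intro s hs
        rcases Bool.eq_false_or_eq_true (PySem.Chars.isIn s cs) with h | h
        · exact absurd (mem_cand_iff.2 ⟨hs, h⟩) (by rw [hcand0]; simp)
        · exact h
      have hbl : bLast (c :: cs) = bMatchAt (c :: cs) := by simp [bLast, hbln]
      cases hf : bTokens.find? (fun p => PySem.Chars.startswith (c :: cs) p.1) with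
      | none =>
        left
        have hnp : ∀ p ∈ bTokens, ¬ p.1 <+: (c :: cs) := by
          intro p hp hpre
          have hx := List.find?_eq_none.1 hf p hp
          exact hx (by rw [PySem.Chars.startswith_iff]; exact hpre)
        have hc : aCand (c :: cs) = [] := by
          rw [aCand, List.filter_eq_nil_iff]
          intro s hs
          rw [isIn_cons, hnin s hs]
          rcases exists_tok hs with ⟨p, hp, rfl⟩
          have : p.1.isPrefixOf (c :: cs) = false := by
            rcases Bool.eq_false_or_eq_true (p.1.isPrefixOf (c :: cs)) with h | h
            · exact absurd (List.isPrefixOf_iff_prefix.1 h) (hnp p hp)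
            · exact h
          rw [this]
          simp
        exact ⟨by simp [pairsR, hc, pyMaxPairs], by rw [hbl]; simp [bMatchAt, hf], hc⟩
      | some p =>
        have hpmem := List.mem_of_find?_eq_some hf
        have hppre : p.1 <+: (c :: cs) := by
          have := List.find?_some hf
          rwa [PySem.Chars.startswith_iff] at this
        have hrcs : PySem.Chars.rfind cs p.1 = -1 :=
          (rfind_eq_neg_one_iff' p.1 cs).2 (hnin p.1 (mem_numbers hpmem))
        have hr0 : PySem.Chars.rfind (c :: cs) p.1 = 0 := by
          rw [rfind_cons, if_pos hrcs, if_pos (List.isPrefixOf_iff_prefix.2 hppre)]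
        have hisin : PySem.Chars.isIn p.1 (c :: cs) = true := by
          rw [isIn_cons, List.isPrefixOf_iff_prefix.2 hppre]; simp
        have hcand : p.1 ∈ aCand (c :: cs) := mem_cand_iff.2 ⟨mem_numbers hpmem, hisin⟩
        have hpair : ((0 : Int), p.1) ∈ pairsR (c :: cs) := by
          simp only [pairsR]
          exact List.mem_map.2 ⟨p.1, hcand, by rw [hr0]⟩
        have hothers : ∀ q ∈ pairsR (c :: cs), q ≠ ((0 : Int), p.1) → q.1 < 0 := by
          intro q hq hne
          simp only [pairsR] at hq
          rcases List.mem_map.1 hq with ⟨s, hs, rfl⟩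
          rcases mem_cand_iff.1 hs with ⟨hsN, hsIn⟩
          exfalso
          by_cases hsp : s = p.1
          · subst hsp; rw [hr0] at hne; exact hne rfl
          · rcases exists_tok hsN with ⟨ps, hpsmem, rfl⟩
            have hnpre : ¬ ps.1 <+: (c :: cs) := by
              intro hpre
              exact hsp (congrArg Prod.fst (tok_uniq hpsmem hpmem hpre hppre))
            rw [isIn_cons, hnin ps.1 hsN] at hsIn
            have : ps.1.isPrefixOf (c :: cs) = false := by
              rcases Bool.eq_false_or_eq_true (ps.1.isPrefixOf (c :: cs)) with h | h
              · exact absurd (List.isPrefixOf_iff_prefix.1 h) hnpre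
              · exact h
            rw [this] at hsIn
            simp at hsIn
        right
        exact ⟨p, hpmem, 0, le_refl 0, hr0, pyMaxPairs_unique hpair (fun q hq hne => hothers q hq hne),
          by rw [hbl]; simp [bMatchAt, hf], hothers⟩
    · have hiscs : PySem.Chars.isIn p.1 cs = true := by
        rcases Bool.eq_false_or_eq_true (PySem.Chars.isIn p.1 cs) with h | h
        · exact h
        · exfalso
          have := (rfind_eq_neg_one_iff' p.1 cs).2 h
          omega
      have hbl : bLast (c :: cs) = some p.2 := by simp [bLast, hbls]
      have hrf' : PySem.Chars.rfind (c :: cs) p.1 = i + 1 := by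
        rw [rfind_cons, if_neg (by omega), hrfind]
      have hisin : PySem.Chars.isIn p.1 (c :: cs) = true := by
        rw [isIn_cons, hiscs]; simp
      have hmemc : p.1 ∈ aCand (c :: cs) := mem_cand_iff.2 ⟨mem_numbers hpmem, hisin⟩
      have hpair : ((i + 1 : Int), p.1) ∈ pairsR (c :: cs) := by
        simp only [pairsR]
        exact List.mem_map.2 ⟨p.1, hmemc, by rw [hrf']⟩
      have hothers : ∀ q ∈ pairsR (c :: cs), q ≠ ((i + 1 : Int), p.1) → q.1 < i + 1 := by
        intro q hq hne
        simp only [pairsR] at hq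
        rcases List.mem_map.1 hq with ⟨s, hs, rfl⟩
        rcases mem_cand_iff.1 hs with ⟨hsN, hsIn⟩
        by_cases hsp : s = p.1
        · exfalso; subst hsp; rw [hrf'] at hne; exact hne rfl
        · by_cases hin : PySem.Chars.isIn s cs = true
          · have hrne : ¬ PySem.Chars.rfind cs s = -1 := by
              intro h
              rw [(rfind_eq_neg_one_iff' s cs).1 h] at hin
              exact Bool.false_ne_true hin
            have hrs : PySem.Chars.rfind (c :: cs) s = PySem.Chars.rfind cs s + 1 := by
              rw [rfind_cons, if_neg hrne]
            have hmem2 : (PySem.Chars.rfind cs s, s) ∈ pairsR cs := by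
              simp only [pairsR]
              exact List.mem_map.2 ⟨s, mem_cand_iff.2 ⟨hsN, hin⟩, rfl⟩
            have hne2 : ((PySem.Chars.rfind cs s : Int), s) ≠ (i, p.1) := by
              intro he
              exact hsp (congrArg Prod.snd he)
            have := hinv _ hmem2 hne2
            simp only [hrs]
            simp only at this
            omega
          · have hin' : PySem.Chars.isIn s cs = false := by
              rcases Bool.eq_false_or_eq_true (PySem.Chars.isIn s cs) with h | h
              · exact absurd h hin
              · exact h
            have hrcs : PySem.Chars.rfind cs s = -1 := (rfind_eq_neg_one_iff' s cs).2 hin'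
            have hrs : PySem.Chars.rfind (c :: cs) s =
                if s.isPrefixOf (c :: cs) then 0 else -1 := by
              rw [rfind_cons, if_pos hrcs]
            simp only [hrs]
            by_cases hp2 : s.isPrefixOf (c :: cs) <;> simp [hp2] <;> omega
      right
      exact ⟨p, hpmem, i + 1, by omega, hrf',
        pyMaxPairs_unique hpair (fun q hq hne => hothers q hq hne), hbl, hothers⟩

theorem aMap_tok : ∀ p ∈ bTokens, aMap p.1 = some [p.2] := by decide

theorem ofChars_tok : ∀ p ∈ bTokens, ∀ q ∈ bTokens,
    (PySem.Int.ofChars? [p.2, q.2]).isSome = true := by decide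

theorem line_eq {l : List Char} (h : ∃ s ∈ aNumbers, PySem.Chars.isIn s l = true) :
    ∃ v, aLine l = some v ∧ bLine l = some v := by
  rcases h with ⟨s0, hs0, hin0⟩
  have hcand0 : s0 ∈ aCand l := mem_cand_iff.2 ⟨hs0, hin0⟩
  rcases firstInv l with ⟨_, _, hc⟩ | ⟨p, hpmem, i, _, _, hmin, hbf, _⟩
  · rw [hc] at hcand0; simp at hcand0
  rcases lastInv l with ⟨_, _, hc⟩ | ⟨q, hqmem, j, _, _, hmax, hbl, _⟩
  · rw [hc] at hcand0; simp at hcand0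
  have hsome := ofChars_tok p hpmem q hqmem
  rcases Option.isSome_iff_exists.1 hsome with ⟨v, hv⟩
  refine ⟨v, ?_, ?_⟩
  · rw [aLine, hmin, hmax]
    simp only [aMap_tok p hpmem, aMap_tok q hqmem]
    simpa using hv
  · rw [bLine, hbf, hbl]
    exact hv

theorem loop_eq : ∀ ls : List (List Char),
    (∀ l ∈ ls, ∃ s ∈ aNumbers, PySem.Chars.isIn s l = true) →
    ∃ vs, bVals ls = some vs ∧ ∀ total : Int, aLoop ls total = some (total + vs.sum) := by
  intro ls
  induction ls with
  | nil => exact fun _ => ⟨[], rfl, fun total => by simp [aLoop]⟩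
  | cons l ls ih =>
    intro hall
    rcases line_eq (hall l List.mem_cons_self) with ⟨v, hA, hB⟩
    rcases ih (fun l' hl' => hall l' (List.mem_cons_of_mem _ hl')) with ⟨vs, hvs, hloop⟩
    refine ⟨v :: vs, by rw [bVals, hB, hvs], fun total => ?_⟩
    rw [aLoop, hA]
    simp only []
    rw [hloop (total + v)]
    simp [add_assoc]

-- ===== VERDICT (by name: the statement is the Claim_ definition above) =====
theorem part2_spec : Claim_equal_part2 := by
  intro input_str _ hpre
  unfold Spec_part2
  unfold Pre_part2 at hpre
  rw [part2, part2_alt]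
  rcases loop_eq _ hpre with ⟨vs, hb, ha⟩
  rw [ha 0, hb, zero_add]
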